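-- pv_equiv track=rewrite | github.com/ziyiwang726/chai_project | Gopalakrishnan/LLMCode/normalize_patient_direction.py | collect_coef_signal
-- ===== SOURCE A (Python) =====
-- def collect_coef_signal(values):
--     cleaned = [v for v in values if v is not None]
--     if not cleaned:
--         return None
--     if all(v < 0 for v in cleaned):
--         return "+"
--     if all(v > 0 for v in cleaned):
--         return "-"
--     return None
-- ===== SOURCE B (Python) =====
-- def collect_coef_signal(values):
--     # Decide via extremes: all values are negative iff the maximum is negative,
--     # all positive iff the minimum is positive.
--     lo = hi = None
--     for v in values:
--         if v is None:
--             continue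
--         if lo is None or v < lo:
--             lo = v
--         if hi is None or v > hi:
--             hi = v
--     if hi is None:
--         return None
--     if hi < 0:
--         return "+"
--     if lo > 0:
--         return "-"
--     return None
-- ===== Notes on version B (the rewrite author's own statement) =====
-- stated objective: alternative
-- what changed: Decides by extremal values instead of uniformity tests: one pass maintains the running min and max of the non-None values, then returns '+' iff max < 0 and '-' iff min > 0, replacing the filtered list and the two all() scans.
import Mathlib
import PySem

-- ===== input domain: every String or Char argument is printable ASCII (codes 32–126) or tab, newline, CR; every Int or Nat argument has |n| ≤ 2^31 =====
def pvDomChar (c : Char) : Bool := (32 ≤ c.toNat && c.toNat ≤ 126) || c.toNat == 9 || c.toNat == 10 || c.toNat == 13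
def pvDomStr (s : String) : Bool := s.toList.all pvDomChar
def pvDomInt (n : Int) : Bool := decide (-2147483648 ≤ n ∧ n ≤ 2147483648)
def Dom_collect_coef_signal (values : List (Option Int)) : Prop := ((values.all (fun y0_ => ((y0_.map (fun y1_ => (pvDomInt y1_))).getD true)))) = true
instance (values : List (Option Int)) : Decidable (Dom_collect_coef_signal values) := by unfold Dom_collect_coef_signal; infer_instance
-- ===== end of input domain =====

-- B decides by extremal values (running min/max of the non-None entries: '+' iff max < 0, '-' iff min > 0)
-- instead of A's filtered list plus two all() uniformity scans; objective: alternative, same cost.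

-- ===== PORT A =====
def collect_coef_signal (values : List (Option Int)) : Option String :=
  let cleaned := values.filterMap id
  if cleaned.isEmpty then none
  else if cleaned.all (fun v => v < 0) then some "+"
  else if cleaned.all (fun v => v > 0) then some "-"
  else none

-- ===== PORT B =====
-- one loop step of Source B: update the running (lo, hi); None is skipped
def csStep (s : Option Int × Option Int) (v : Option Int) : Option Int × Option Int :=
  match v with
  | none => s
  | some x =>
    let lo := match s.1 with
      | none => some x
      | some l => if x < l then some x else some l
    let hi := match s.2 with
      | none => some x
      | some h => if x > h then some x else some h
    (lo, hi)

def collect_coef_signal_alt (values : List (Option Int)) : Option String :=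
  let s := values.foldl csStep (none, none)
  match s.2 with
  | none => none
  | some h =>
    if h < 0 then some "+"
    else
      match s.1 with
      | none => none   -- unreachable: lo is set whenever hi is (Python would raise here)
      | some l => if l > 0 then some "-" else none

-- ===== PRECONDITION & SPEC =====
def Spec_collect_coef_signal (values : List (Option Int)) (out : Option String) : Prop := out = collect_coef_signal_alt values
instance (values : List (Option Int)) (out : Option String) : Decidable (Spec_collect_coef_signal values out) := by unfold Spec_collect_coef_signal; infer_instance

-- ===== CLAIM (what is proved, stated in full; the proofs are below) =====
def Claim_equal_collect_coef_signal : Prop := ∀ (values : List (Option Int)), Dom_collect_coef_signal values → Spec_collect_coef_signal values (collect_coef_signal values)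

-- ===== LEMMAS AND PROOFS =====

-- the fold over values is the fold over the cleaned (filterMap id) list
theorem csStep_fold_filterMap (values : List (Option Int)) (s : Option Int × Option Int) :
    values.foldl csStep s = (values.filterMap id).foldl (fun s x => csStep s (some x)) s := by
  induction values generalizing s with
  | nil => rfl
  | cons v vs ih =>
    cases v with
    | none => simp [List.foldl, csStep, ih]
    | some x => simp [List.foldl, ih]

-- from a fully-set state, the fold computes running min and max
theorem csStep_fold_some (l : List Int) (a b : Int) :
    l.foldl (fun s x => csStep s (some x)) (some a, some b)
      = (some (l.foldl min a), some (l.foldl max b)) := by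
  induction l generalizing a b with
  | nil => rfl
  | cons x xs ih =>
    simp only [List.foldl_cons]
    have h1 : csStep (some a, some b) (some x)
        = (some (min a x), some (max b x)) := by
      simp only [csStep, min_def, max_def, Prod.mk.injEq]
      constructor
      · split_ifs <;> simp_all <;> omega
      · split_ifs <;> simp_all <;> omega
    rw [h1, ih]

theorem foldl_max_neg (ys : List Int) (y : Int) :
    ys.foldl max y < 0 ↔ ∀ v ∈ y :: ys, v < 0 := by
  induction ys generalizing y with
  | nil => simp
  | cons z ys ih =>
    simp only [List.foldl_cons]
    rw [ih]
    simp only [List.forall_mem_cons, max_lt_iff]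
    tauto

theorem foldl_min_pos (ys : List Int) (y : Int) :
    0 < ys.foldl min y ↔ ∀ v ∈ y :: ys, 0 < v := by
  induction ys generalizing y with
  | nil => simp
  | cons z ys ih =>
    simp only [List.foldl_cons]
    rw [ih]
    simp only [List.forall_mem_cons, lt_min_iff]
    tauto

-- ===== VERDICT (by name: the statement is the Claim_ definition above) =====
theorem collect_coef_signal_spec : Claim_equal_collect_coef_signal := by
  intro values _
  unfold Spec_collect_coef_signal collect_coef_signal collect_coef_signal_alt
  rw [csStep_fold_filterMap]
  cases hcl : values.filterMap id with
  | nil => simp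
  | cons y ys =>
    simp only [List.foldl_cons]
    have h0 : csStep ((none : Option Int), (none : Option Int)) (some y) = (some y, some y) := rfl
    rw [h0, csStep_fold_some]
    simp only [List.isEmpty_cons, Bool.false_eq_true, if_false]
    by_cases hneg : ∀ v ∈ y :: ys, v < 0
    · have hb : (y :: ys).all (fun v => decide (v < 0)) = true := by
        simp only [List.all_eq_true, decide_eq_true_eq]; exact hneg
      have hm : ys.foldl max y < 0 := (foldl_max_neg ys y).mpr hneg
      simp [hb, hm]
    · have hb : ¬ ((y :: ys).all (fun v => decide (v < 0)) = true) := by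
        simp only [List.all_eq_true, decide_eq_true_eq]; exact hneg
      have hm : ¬ (ys.foldl max y < 0) := fun h => hneg ((foldl_max_neg ys y).mp h)
      by_cases hpos : ∀ v ∈ y :: ys, 0 < v
      · have hb2 : (y :: ys).all (fun v => decide (v > 0)) = true := by
          simp only [List.all_eq_true, decide_eq_true_eq]; exact hpos
        have hm2 : 0 < ys.foldl min y := (foldl_min_pos ys y).mpr hpos
        simp [hb, hb2, hm, hm2]
      · have hb2 : ¬ ((y :: ys).all (fun v => decide (v > 0)) = true) := by
          simp only [List.all_eq_true, decide_eq_true_eq]; exact hpos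
        have hm2 : ¬ (0 < ys.foldl min y) := fun h => hpos ((foldl_min_pos ys y).mp h)
        simp [hb, hb2, hm, hm2]
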